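-- pv_equiv track=rewrite | github.com/yzq-web/PocketXMol | extensions/pdb_combined_pred.py | _renumber_protein_chain_ids
-- ===== SOURCE A (Python) =====
-- def _replace_chain_id(line, new_chain_id):
--     if len(line) < 22:
--         return line
--     return line[:21] + new_chain_id + line[22:]
--
-- def _renumber_protein_chain_ids(lines):
--     """
--     Rename protein chain IDs starting from 'R' in encounter order:
--     R, S, T, ... (single-character PDB chain IDs).
--     """
--     mapping = {}
--     next_code = ord("R")
--     updated = []
--     for line in lines:
--         if line.startswith(("ATOM", "HETATM", "TER")) and len(line) >= 22:
--             old_chain = line[21]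
--             if old_chain not in mapping:
--                 if next_code > ord("Z"):
--                     raise ValueError("Protein has too many chains to rename within 'R'..'Z'")
--                 mapping[old_chain] = chr(next_code)
--                 next_code += 1
--             line = _replace_chain_id(line, mapping[old_chain])
--         updated.append(line)
--     return updated
-- ===== SOURCE B (Python) =====
-- def _renumber_protein_chain_ids(lines):
--     def _qualifies(line):
--         return line.startswith(("ATOM", "HETATM", "TER")) and len(line) >= 22
--
--     # pass 1: distinct chain chars of qualifying lines, in encounter order
--     chains = list(dict.fromkeys(line[21] for line in lines if _qualifies(line)))
--     if len(chains) > 9: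
--         raise ValueError("Protein has too many chains to rename within 'R'..'Z'")
--     mapping = {c: chr(ord("R") + i) for i, c in enumerate(chains)}
--     # pass 2: rewrite column 21 of every qualifying line
--     return [line[:21] + mapping[line[21]] + line[22:] if _qualifies(line) else line
--             for line in lines]
-- ===== Notes on version B (the rewrite author's own statement) =====
-- stated objective: alternative
-- what changed: A does one pass growing a chain->id dict and next-code counter as it rewrites; B first collects the distinct chain chars of qualifying lines in encounter order (dict.fromkeys), builds the whole mapping by enumeration, then rewrites every line in a second pass.
import Mathlib
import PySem

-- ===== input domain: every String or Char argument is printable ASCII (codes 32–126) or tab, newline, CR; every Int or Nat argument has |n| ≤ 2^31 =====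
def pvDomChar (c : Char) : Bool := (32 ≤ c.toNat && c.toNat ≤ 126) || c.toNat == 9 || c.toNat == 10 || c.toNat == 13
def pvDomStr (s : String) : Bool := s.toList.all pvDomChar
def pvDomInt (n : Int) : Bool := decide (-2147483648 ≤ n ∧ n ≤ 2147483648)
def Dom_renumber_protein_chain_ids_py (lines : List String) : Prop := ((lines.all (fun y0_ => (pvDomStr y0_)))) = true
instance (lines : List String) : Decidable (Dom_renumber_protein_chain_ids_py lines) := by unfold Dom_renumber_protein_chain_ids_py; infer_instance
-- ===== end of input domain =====

-- B replaces A's single pass with a mutable dict by two passes (collect distinct chains, then rewrite); alternative decomposition, not faster.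
-- Both programs raise ValueError on more than 9 distinct qualifying chains; Pre_ excludes exactly those inputs.

-- line.startswith(("ATOM", "HETATM", "TER")) and len(line) >= 22   (shared by both ports)
def pvQualifies (cs : List Char) : Bool :=
  (PySem.Chars.startswith cs "ATOM".toList || PySem.Chars.startswith cs "HETATM".toList
    || PySem.Chars.startswith cs "TER".toList) && decide (22 ≤ cs.length)

-- ===== PORT A =====
-- _replace_chain_id
def pvReplaceChainId (line : List Char) (c : Char) : List Char :=
  if line.length < 22 then line
  else PySem.List.slice line none (some 21) ++ [c] ++ PySem.List.slice line (some 22) none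

-- the for-loop of A: state = (mapping, next_code); the 'next_code > ord("Z")' raise is
-- excluded by Pre_, so the port simply keeps numbering there.
def pvALoop : List String → PySem.Dict Char Char → Int → List String
  | [], _, _ => []
  | line :: rest, mapping, nextCode =>
    let cs := line.toList
    if pvQualifies cs then
      let old := PySem.List.pyGetD cs 21 ' '   -- line[21]; in range since len(line) ≥ 22
      match mapping.get? old with
      | some c => String.mk (pvReplaceChainId cs c) :: pvALoop rest mapping nextCode
      | none =>
        let c := Char.ofNat nextCode.toNat     -- chr(next_code)
        String.mk (pvReplaceChainId cs c) :: pvALoop rest (mapping.insert old c) (nextCode + 1)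
    else line :: pvALoop rest mapping nextCode

def renumber_protein_chain_ids_py (lines : List String) : List String :=
  pvALoop lines PySem.Dict.empty 82

-- ===== PORT B =====
-- the chain chars of the qualifying lines, in order
def pvChs (lines : List String) : List Char :=
  (lines.filter (fun l => pvQualifies l.toList)).map (fun l => PySem.List.pyGetD l.toList 21 ' ')

-- pass 1: list(dict.fromkeys(...))
def pvChains (lines : List String) : List Char :=
  PySem.List.dedup (pvChs lines)

-- {c: chr(ord("R") + i) for i, c in enumerate(chains)}
def pvMapping (chains : List Char) : PySem.Dict Char Char :=
  (PySem.List.enumerate chains 0).foldl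
    (fun d p => d.insert p.2 (Char.ofNat ((82 + p.1).toNat))) PySem.Dict.empty

-- pass 2: rewrite column 21 of qualifying lines (mapping[line[21]] cannot miss: the key is in chains)
def renumber_protein_chain_ids_py_alt (lines : List String) : List String :=
  let mapping := pvMapping (pvChains lines)
  lines.map (fun line =>
    let cs := line.toList
    if pvQualifies cs then
      String.mk (PySem.List.slice cs none (some 21)
        ++ [mapping.getD (PySem.List.pyGetD cs 21 ' ') ' ']
        ++ PySem.List.slice cs (some 22) none)
    else line)

-- ===== PRECONDITION & SPEC =====
-- Pre_ excludes exactly the inputs with more than 9 distinct chain ids among qualifying lines,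
-- on which Python A raises ValueError (and B does too).
def Pre_renumber_protein_chain_ids_py (lines : List String) : Prop :=
  (pvChains lines).length ≤ 9
instance (lines : List String) : Decidable (Pre_renumber_protein_chain_ids_py lines) := by
  unfold Pre_renumber_protein_chain_ids_py; infer_instance

def pvWitness_renumber_protein_chain_ids_py : List String :=
  ["ATOM                 A", "TER                  B", "ATOM                 A"]

def Spec_renumber_protein_chain_ids_py (lines : List String) (out : List String) : Prop :=
  out = renumber_protein_chain_ids_py_alt lines
instance (lines : List String) (out : List String) : Decidable (Spec_renumber_protein_chain_ids_py lines out) := by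
  unfold Spec_renumber_protein_chain_ids_py; infer_instance

-- ===== CLAIM (what is proved, stated in full; the proofs are below) =====
def Claim_equal_renumber_protein_chain_ids_py : Prop :=
  ∀ (lines : List String), Dom_renumber_protein_chain_ids_py lines →
    Pre_renumber_protein_chain_ids_py lines →
    Spec_renumber_protein_chain_ids_py lines (renumber_protein_chain_ids_py lines)

-- ===== LEMMAS AND PROOFS =====

lemma pvMapping_snoc (ks : List Char) (k : Char) :
    pvMapping (ks ++ [k]) = (pvMapping ks).insert k (Char.ofNat (82 + ks.length)) := by
  have h : ((82:Int) + (ks.length : Int)).toNat = 82 + ks.length := by omega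
  simp [pvMapping, PySem.List.enumerate_append, List.foldl_append, h]

lemma get?_pvMapping_of_not_mem (ks : List Char) (c : Char) (hc : c ∉ ks) :
    (pvMapping ks).get? c = none := by
  induction ks using List.reverseRecOn with
  | nil => rfl
  | append_singleton ks k ih =>
    rw [pvMapping_snoc, PySem.Dict.get?_insert]
    simp only [List.mem_append, List.mem_singleton, not_or] at hc
    simp [hc.2, ih hc.1]

lemma get?_pvMapping_of_mem (ks : List Char) (hnd : ks.Nodup) (c : Char) (hc : c ∈ ks) :
    (pvMapping ks).get? c = some (Char.ofNat (82 + ks.idxOf c)) := by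
  induction ks using List.reverseRecOn with
  | nil => cases hc
  | append_singleton ks k ih =>
    have hnd' : ks.Nodup := (List.nodup_append.mp hnd).1
    have hk : k ∉ ks := fun h =>
      List.disjoint_of_nodup_append hnd h (List.mem_singleton_self k)
    rw [pvMapping_snoc, PySem.Dict.get?_insert]
    by_cases hck : c = k
    · subst hck
      rw [List.idxOf_append_of_notMem hk]
      simp
    · have hcks : c ∈ ks := by
        rcases List.mem_append.mp hc with h | h
        · exact h
        · exact absurd (List.mem_singleton.mp h) hck
      rw [if_neg hck, ih hnd' hcks, List.idxOf_append_of_mem hcks]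

lemma idxOf_update_of_mem (s : PySem.Set Char) (xs : List Char) (c : Char) (hc : c ∈ s) :
    (PySem.Set.update s xs).idxOf c = s.idxOf c := by
  rw [PySem.Set.update_eq_append_filter, List.idxOf_append_of_mem hc]

-- the main invariant: A's loop from state (mapping of 'seen', 82 + |seen|) rewrites every
-- line with the FINAL mapping of seen ++ (new chains of the remaining lines)
lemma pvALoop_eq (lines : List String) (seen : List Char) (hnd : seen.Nodup) :
    pvALoop lines (pvMapping seen) (82 + (seen.length : Int)) =
    lines.map (fun line =>
      let cs := line.toList
      if pvQualifies cs then
        String.mk (PySem.List.slice cs none (some 21)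
          ++ [(pvMapping (PySem.Set.update seen (pvChs lines))).getD (PySem.List.pyGetD cs 21 ' ') ' ']
          ++ PySem.List.slice cs (some 22) none)
      else line) := by
  induction lines generalizing seen with
  | nil => simp [pvALoop]
  | cons l rest ih =>
    by_cases hq : pvQualifies l.toList
    · have hlen : ¬ (l.toList.length < 22) := by
        simp only [pvQualifies, Bool.and_eq_true, decide_eq_true_eq] at hq
        omega
      set c := PySem.List.pyGetD l.toList 21 ' ' with hc_def
      have hchs : pvChs (l :: rest) = c :: pvChs rest := by
        simp [pvChs, hq, hc_def]
      by_cases hc : c ∈ seen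
      · -- chain already seen
        have hupd : PySem.Set.update seen (pvChs (l :: rest)) = PySem.Set.update seen (pvChs rest) := by
          rw [hchs, PySem.Set.update_cons, PySem.Set.add_of_mem hc]
        have hmem : c ∈ PySem.Set.update seen (pvChs rest) := by
          rw [PySem.Set.mem_update]; exact Or.inl hc
        have hndu : (PySem.Set.update seen (pvChs rest)).Nodup := PySem.Set.nodup_update _ _ hnd
        have hval : (pvMapping (PySem.Set.update seen (pvChs rest))).getD c ' '
            = Char.ofNat (82 + seen.idxOf c) := by
          rw [PySem.Dict.getD_eq_get?_getD, get?_pvMapping_of_mem _ hndu _ hmem,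
            idxOf_update_of_mem _ _ _ hc, Option.getD_some]
        simp only [pvALoop, hq, if_true, ← hc_def, get?_pvMapping_of_mem seen hnd c hc,
          List.map_cons, hupd, pvReplaceChainId, if_neg hlen, hval]
        try rw [ih seen hnd]
      · -- new chain
        have hnone := get?_pvMapping_of_not_mem seen c hc
        have hchar : Char.ofNat (82 + (seen.length : Int)).toNat = Char.ofNat (82 + seen.length) := by
          congr 1
        have hins : (pvMapping seen).insert c (Char.ofNat (82 + seen.length)) = pvMapping (seen ++ [c]) :=
          (pvMapping_snoc seen c).symm
        have hnd' : (seen ++ [c]).Nodup := by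
          simp [List.nodup_append, hnd]
          intro a ha h
          exact hc (h ▸ ha)
        have hupd : PySem.Set.update seen (pvChs (l :: rest)) = PySem.Set.update (seen ++ [c]) (pvChs rest) := by
          rw [hchs, PySem.Set.update_cons, PySem.Set.add_of_not_mem hc]
        have hmem : c ∈ PySem.Set.update (seen ++ [c]) (pvChs rest) := by
          rw [PySem.Set.mem_update]; exact Or.inl (by simp)
        have hndu : (PySem.Set.update (seen ++ [c]) (pvChs rest)).Nodup := PySem.Set.nodup_update _ _ hnd'
        have hidx : (seen ++ [c]).idxOf c = seen.length := by
          rw [List.idxOf_append_of_notMem hc]; simp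
        have hval : (pvMapping (PySem.Set.update (seen ++ [c]) (pvChs rest))).getD c ' '
            = Char.ofNat (82 + seen.length) := by
          rw [PySem.Dict.getD_eq_get?_getD,
            get?_pvMapping_of_mem _ hndu _ hmem,
            idxOf_update_of_mem _ _ _ (by simp : c ∈ seen ++ [c]), hidx, Option.getD_some]
        have hnext : (82 + (seen.length : Int)) + 1 = 82 + (((seen ++ [c]).length : Nat) : Int) := by
          simp; ring
        simp only [pvALoop, hq, if_true, ← hc_def, hnone, List.map_cons, hupd,
          pvReplaceChainId, if_neg hlen, hchar, hins, hval, hnext]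
        try rw [ih (seen ++ [c]) hnd']
    · have hchs : pvChs (l :: rest) = pvChs rest := by simp [pvChs, hq]
      simp only [pvALoop, hq, List.map_cons, Bool.false_eq_true, if_false, hchs]
      try rw [ih seen hnd]

-- ===== VERDICT (by name: the statement is the Claim_ definition above) =====
theorem renumber_protein_chain_ids_py_spec : Claim_equal_renumber_protein_chain_ids_py := by
  intro lines _ _
  unfold Spec_renumber_protein_chain_ids_py renumber_protein_chain_ids_py
    renumber_protein_chain_ids_py_alt
  have h0 : (PySem.Dict.empty : PySem.Dict Char Char) = pvMapping [] := rfl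
  have h1 : (82 : Int) = 82 + (([] : List Char).length : Int) := by simp
  rw [h0, h1, pvALoop_eq lines [] List.nodup_nil]
  simp [pvChains, PySem.Set.update_nil_left]
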